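-- pv_equiv track=rewrite | github.com/diegolonio/ESCOM | Álgebra Lineal/solver.py | free_variables
-- ===== SOURCE A (Python) =====
-- def is_zeros_row(row : list) -> bool:
--     """
--     Determine if all of the elements in a row are zero.
--
--     Args:
--         row: The row to analyse.
--
--     Returns:
--         If all of the elements in the given row are zero,
--         the function returns True; otherwise, it returns False.
--     """
--
--     is_zeros_row = True
--
--     for j in range(len(row)):
--         if row[j] != 0:
--             is_zeros_row = False
--
--     return is_zeros_row
--
-- def free_variables(solved_matrix : list) -> int:
--     """
--     Get the quantity of free variables of a solved system of equations.
--
--     Args: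
--         solved_matrix: The matrix representation of the solved system of equations.
--
--     Returns:
--         The quantity of free variables of the given solved system of equations.
--     """
--
--     free_variables = 0
--
--     # From the last row to the first one
--     for i in range(len(solved_matrix)-1, -1, -1):
--         # If the elements of the current row aren't all zero
--         if not is_zeros_row(solved_matrix[i]):
--             # From the column before the last one to the i-th column
--             for j in range(len(solved_matrix[i])-2, i, -1):
--                 free_variables += 1
--             break
--
--     return free_variables
-- ===== SOURCE B (Python) =====
-- def free_variables(solved_matrix: list) -> int:
--     last = -1
--     row_len = 0
--     for i, row in enumerate(solved_matrix):
--         if any(row):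
--             last = i
--             row_len = len(row)
--     if last == -1:
--         return 0
--     return max(0, row_len - 2 - last)
-- ===== Notes on version B (the rewrite author's own statement) =====
-- stated objective: simpler
-- what changed: B replaces A's reverse index scan with break plus an inner counting loop (and the is_zeros_row helper's full-row flag loop) by one forward pass that remembers the index and length of the last non-zero row, finishing with the closed form max(0, row_len - 2 - last).
import Mathlib
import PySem

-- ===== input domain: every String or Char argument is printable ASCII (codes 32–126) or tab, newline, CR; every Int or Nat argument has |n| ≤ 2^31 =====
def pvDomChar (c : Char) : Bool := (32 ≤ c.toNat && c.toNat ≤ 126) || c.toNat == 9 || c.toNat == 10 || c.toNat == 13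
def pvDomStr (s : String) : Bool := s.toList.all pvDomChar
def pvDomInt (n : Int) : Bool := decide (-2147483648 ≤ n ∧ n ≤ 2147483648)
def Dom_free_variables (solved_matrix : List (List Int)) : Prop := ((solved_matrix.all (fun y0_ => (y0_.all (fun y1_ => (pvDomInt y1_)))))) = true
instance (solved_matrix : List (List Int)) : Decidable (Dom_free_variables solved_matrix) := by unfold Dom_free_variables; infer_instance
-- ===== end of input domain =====

-- B changes the decomposition: a single forward pass recording the last non-zero row plus a
-- closed-form subtraction, instead of A's reverse scan-with-break and inner counting loop.

-- ===== PORT A =====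
-- helper is_zeros_row: flag loop over all indices of the row
def is_zeros_row (row : List Int) : Bool :=
  (PySem.List.pyRange 0 (row.length : Int) 1).foldl
    (fun b j => if PySem.List.pyGetD row j 0 ≠ 0 then false else b) true

-- inner loop 'for j in range(len(row)-2, i, -1): free_variables += 1'
def fvCount (rowlen : Int) (i : Int) : Int :=
  (PySem.List.pyRange (rowlen - 2) i (-1)).foldl (fun a _ => a + 1) 0

-- outer loop over i = len-1 .. 0 with break at the first non-zero row
def fvLoop (m : List (List Int)) : List Int → Int
  | [] => 0
  | i :: rest =>
      if ¬ is_zeros_row (PySem.List.pyGetD m i []) then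
        fvCount ((PySem.List.pyGetD m i []).length : Int) i
      else fvLoop m rest

def free_variables (solved_matrix : List (List Int)) : Int :=
  fvLoop solved_matrix (PySem.List.pyRange ((solved_matrix.length : Int) - 1) (-1) (-1))

-- ===== PORT B =====
def free_variables_alt (solved_matrix : List (List Int)) : Int :=
  let st := (PySem.List.enumerate solved_matrix 0).foldl
    (fun (st : Int × Int) (p : Int × List Int) =>
      if p.2.any (fun x => x != 0) then (p.1, (p.2.length : Int)) else st)
    (-1, 0)
  if st.1 = -1 then 0 else max 0 (st.2 - 2 - st.1)

-- ===== PRECONDITION & SPEC =====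
def Spec_free_variables (solved_matrix : List (List Int)) (out : Int) : Prop := out = free_variables_alt solved_matrix
instance (solved_matrix : List (List Int)) (out : Int) : Decidable (Spec_free_variables solved_matrix out) := by unfold Spec_free_variables; infer_instance

-- ===== CLAIM (what is proved, stated in full; the proofs are below) =====
def Claim_equal_free_variables : Prop := ∀ (solved_matrix : List (List Int)), Dom_free_variables solved_matrix → Spec_free_variables solved_matrix (free_variables solved_matrix)

-- ===== LEMMAS AND PROOFS =====

theorem fv_flag_foldl (row : List Int) (b : Bool) :
    row.foldl (fun b x => if x ≠ 0 then false else b) b = (b && !(row.any (fun x => x != 0))) := by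
  induction row generalizing b with
  | nil => simp
  | cons x xs ih =>
      simp only [List.foldl_cons, List.any_cons, ih]
      by_cases h : x = 0 <;> simp [h]

theorem is_zeros_row_eq (row : List Int) :
    is_zeros_row row = !(row.any (fun x => x != 0)) := by
  unfold is_zeros_row
  rw [PySem.List.foldl_pyRange_zero_pyGetD' row 0 (fun b x => if x ≠ 0 then false else b) true,
    fv_flag_foldl]
  simp

theorem foldl_add_one_len (l : List Int) (c : Int) :
    l.foldl (fun a _ => a + 1) c = c + l.length := by
  induction l generalizing c with
  | nil => simp
  | cons x xs ih => simp [ih]; omega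

theorem fvCount_eq (L i : Int) : fvCount L i = max 0 (L - 2 - i) := by
  unfold fvCount
  rw [foldl_add_one_len, PySem.List.length_pyRange_neg_one]
  omega

theorem pyGetD_append_lt (m : List (List Int)) (r : List Int) (i : Int)
    (h0 : 0 ≤ i) (h1 : i < (m.length : Int)) :
    PySem.List.pyGetD (m ++ [r]) i [] = PySem.List.pyGetD m i [] := by
  obtain ⟨n, rfl⟩ : ∃ n : Nat, i = (n : Int) := ⟨i.toNat, by omega⟩
  rw [PySem.List.pyGetD_natCast, PySem.List.pyGetD_natCast]
  have hn : n < m.length := by exact_mod_cast h1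
  simp [List.getD, List.getElem?_append_left hn]

theorem fvLoop_append (m : List (List Int)) (r : List Int) (js : List Int)
    (h : ∀ i ∈ js, 0 ≤ i ∧ i < (m.length : Int)) :
    fvLoop (m ++ [r]) js = fvLoop m js := by
  induction js with
  | nil => rfl
  | cons j rest ih =>
      have hj := h j (by simp)
      have hrest : ∀ i ∈ rest, 0 ≤ i ∧ i < (m.length : Int) := fun i hi => h i (by simp [hi])
      simp only [fvLoop, pyGetD_append_lt m r j hj.1 hj.2, ih hrest]

theorem main_eq (m : List (List Int)) : free_variables m = free_variables_alt m := by
  induction m using List.reverseRecOn with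
  | nil => decide
  | append_singleton m' r ih =>
      have hlen : ((m' ++ [r]).length : Int) - 1 = (m'.length : Int) := by simp
      have hcons : PySem.List.pyRange ((m'.length : Int)) (-1) (-1)
          = (m'.length : Int) :: PySem.List.pyRange ((m'.length : Int) - 1) (-1) (-1) :=
        PySem.List.pyRange_neg_one_cons (by omega)
      have hget : PySem.List.pyGetD (m' ++ [r]) ((m'.length : Int)) [] = r := by
        rw [PySem.List.pyGetD_natCast]
        simp [List.getD]
      have henum : (PySem.List.enumerate (m' ++ [r]) 0)
          = PySem.List.enumerate m' 0 ++ [((m'.length : Int), r)] := by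
        rw [PySem.List.enumerate_append]
        simp [PySem.List.enumerate]
      unfold free_variables
      rw [hlen, hcons]
      simp only [fvLoop, hget]
      by_cases hz : r.any (fun x => x != 0)
      · -- last row non-zero: A breaks here, B's fold ends in (len m', len r)
        rw [if_pos (by simp [is_zeros_row_eq, hz])]
        unfold free_variables_alt
        rw [henum, List.foldl_append]
        simp only [List.foldl_cons, List.foldl_nil, hz, if_pos]
        have : ¬ ((m'.length : Int) = -1) := by omega
        simp [this, fvCount_eq]
      · -- last row all zero: both sides reduce to the m'-only computation
        rw [if_neg (by simp [is_zeros_row_eq, hz])]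
        rw [fvLoop_append m' r _ (fun i hi => by
          have := (PySem.List.mem_pyRange_neg_one).mp hi
          omega)]
        have hA : fvLoop m' (PySem.List.pyRange ((m'.length : Int) - 1) (-1) (-1)) = free_variables m' := rfl
        rw [hA, ih]
        unfold free_variables_alt
        rw [henum, List.foldl_append]
        simp only [List.foldl_cons, List.foldl_nil, hz, if_neg, Bool.false_eq_true, not_false_iff]

-- ===== VERDICT (by name: the statement is the Claim_ definition above) =====
theorem free_variables_spec : Claim_equal_free_variables := by
  intro m _
  unfold Spec_free_variables
  exact main_eq m
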